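-- pv_equiv track=rewrite | github.com/toasa/tessoku-book | 14b.py | exhaustive_sum_list
-- ===== SOURCE A (Python) =====
-- def exhaustive_sum_list(arr):
--     l = []
--
--     for n in range(2**len(arr)):
--         sum = 0
--         for i in range(len(arr)):
--             if n & 1 << i == 1 << i:
--                 sum += arr[i]
--         l.append(sum)
--
--     return l
-- ===== SOURCE B (Python) =====
-- def exhaustive_sum_list(arr):
--     # doubling DP: for each element, extend the list with all previous sums plus it;
--     # index n of the result is the sum over the set bits of n, in bitmask order.
--     l = [0]
--     for x in arr:
--         l += [s + x for s in l]
--     return l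
-- ===== Notes on version B (the rewrite author's own statement) =====
-- stated objective: faster
-- what changed: Replaces the per-mask inner bit-scan with a doubling DP that extends the sum list once per element, removing the O(n) inner loop; intended as faster, measured ~30x at n=16, the largest size both finish (the output itself has 2^n entries).
import Mathlib
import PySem

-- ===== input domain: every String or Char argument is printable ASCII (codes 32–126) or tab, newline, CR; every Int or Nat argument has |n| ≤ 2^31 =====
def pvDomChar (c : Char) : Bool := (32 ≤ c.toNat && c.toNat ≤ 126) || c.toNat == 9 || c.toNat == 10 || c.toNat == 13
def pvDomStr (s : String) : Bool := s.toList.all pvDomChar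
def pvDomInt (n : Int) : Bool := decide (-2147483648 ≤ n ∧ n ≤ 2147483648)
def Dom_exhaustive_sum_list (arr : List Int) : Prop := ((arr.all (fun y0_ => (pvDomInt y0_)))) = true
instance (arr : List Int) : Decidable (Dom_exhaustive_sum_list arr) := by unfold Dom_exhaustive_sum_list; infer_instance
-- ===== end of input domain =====

-- B replaces A's per-mask inner bit-scan with a doubling DP (extend the sum list once per
-- element): O(2^n) vs A's O(2^n*n); measured ~30x faster at n=16 (the output itself is 2^n long).


-- ===== PORT A =====
-- inner loop of A: `sum = 0; for i in range(len(arr)): if n & 1 << i == 1 << i: sum += arr[i]`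
-- (range indices are nonnegative, so Nat `List.range` is exact here; `arr[i]` with
-- 0 ≤ i < len(arr) is exact as `arr.getD i 0`)
def innerBitSum (arr : List Int) (n : Nat) : Int :=
  (List.range arr.length).foldl
    (fun sum i => if n &&& (1 <<< i) = 1 <<< i then sum + arr.getD i 0 else sum) 0

def exhaustive_sum_list (arr : List Int) : List Int :=
  (List.range (2 ^ arr.length)).foldl (fun l n => l ++ [innerBitSum arr n]) []

-- ===== PORT B =====
-- doubling DP: `l = [0]; for x in arr: l += [s + x for s in l]`
def exhaustive_sum_list_alt (arr : List Int) : List Int :=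
  arr.foldl (fun l x => l ++ l.map (fun s => s + x)) [0]

-- ===== PRECONDITION & SPEC =====
def Spec_exhaustive_sum_list (arr : List Int) (out : List Int) : Prop := out = exhaustive_sum_list_alt arr
instance (arr : List Int) (out : List Int) : Decidable (Spec_exhaustive_sum_list arr out) := by unfold Spec_exhaustive_sum_list; infer_instance

-- ===== CLAIM (what is proved, stated in full; the proofs are below) =====
def Claim_equal_exhaustive_sum_list : Prop := ∀ (arr : List Int), Dom_exhaustive_sum_list arr → Spec_exhaustive_sum_list arr (exhaustive_sum_list arr)

-- ===== LEMMAS AND PROOFS =====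

-- A's outer append-loop is a map over the range.
theorem foldl_append_singleton {α : Type} (g : Nat → α) :
    ∀ (xs : List Nat) (acc : List α),
      xs.foldl (fun l n => l ++ [g n]) acc = acc ++ xs.map g := by
  intro xs
  induction xs with
  | nil => simp
  | cons x xs ih => intro acc; simp [List.foldl, ih]

theorem exhaustive_eq_map (arr : List Int) :
    exhaustive_sum_list arr = (List.range (2 ^ arr.length)).map (innerBitSum arr) := by
  unfold exhaustive_sum_list
  rw [foldl_append_singleton]
  simp

-- splitting the inner loop at its last index
theorem innerBitSum_append (ys : List Int) (x : Int) (n : Nat) :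
    innerBitSum (ys ++ [x]) n =
      (if n &&& (1 <<< ys.length) = 1 <<< ys.length then innerBitSum ys n + x
       else innerBitSum ys n) := by
  unfold innerBitSum
  have hlen : (ys ++ [x]).length = ys.length + 1 := by simp
  rw [hlen, List.range_succ, List.foldl_append]
  have hcong :
      (List.range ys.length).foldl
        (fun sum i => if n &&& (1 <<< i) = 1 <<< i then sum + (ys ++ [x]).getD i 0 else sum) 0 =
      (List.range ys.length).foldl
        (fun sum i => if n &&& (1 <<< i) = 1 <<< i then sum + ys.getD i 0 else sum) 0 := by
    apply PySem.List.foldl_congr_mem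
    intro a b hb
    have hi : b < ys.length := List.mem_range.mp hb
    have : (ys ++ [x]).getD b 0 = ys.getD b 0 := by
      simp [List.getD, List.getElem?_append_left hi]
    rw [this]
  simp only [List.foldl_cons, List.foldl_nil, hcong]
  have : (ys ++ [x]).getD ys.length 0 = x := by
    simp [List.getD]
  split_ifs
  · rw [this]
  · rfl

theorem bit_high_false {L n : Nat} (h : n < 2 ^ L) :
    ¬ (n &&& (1 <<< L) = 1 <<< L) := by
  intro hc
  have := Nat.and_le_left (n := n) (m := 1 <<< L)
  rw [hc, Nat.one_shiftLeft] at this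
  omega

theorem bit_high_true {L n : Nat} (h : n < 2 ^ L) :
    (2 ^ L + n) &&& (1 <<< L) = 1 <<< L := by
  rw [Nat.one_shiftLeft, Nat.and_two_pow, Nat.testBit_two_pow_add_eq,
      Nat.testBit_lt_two_pow h]
  simp

theorem bit_low_eq {L n i : Nat} (hi : i < L) :
    (2 ^ L + n) &&& (1 <<< i) = n &&& (1 <<< i) := by
  rw [Nat.one_shiftLeft, Nat.and_two_pow, Nat.and_two_pow,
      Nat.testBit_two_pow_add_gt hi]

theorem innerBitSum_low {ys : List Int} {x : Int} {n : Nat} (h : n < 2 ^ ys.length) :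
    innerBitSum (ys ++ [x]) n = innerBitSum ys n := by
  rw [innerBitSum_append, if_neg (bit_high_false h)]

theorem innerBitSum_congr (ys : List Int) (n m : Nat)
    (hb : ∀ i, i < ys.length → n &&& (1 <<< i) = m &&& (1 <<< i)) :
    innerBitSum ys n = innerBitSum ys m := by
  unfold innerBitSum
  apply PySem.List.foldl_congr_mem
  intro a b hbmem
  rw [hb b (List.mem_range.mp hbmem)]

theorem innerBitSum_high {ys : List Int} {x : Int} {n : Nat} (h : n < 2 ^ ys.length) :
    innerBitSum (ys ++ [x]) (2 ^ ys.length + n) = innerBitSum ys n + x := by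
  rw [innerBitSum_append, if_pos (bit_high_true h),
      innerBitSum_congr ys (2 ^ ys.length + n) n (fun i hi => bit_low_eq hi)]

theorem alt_eq_map (arr : List Int) :
    exhaustive_sum_list_alt arr = (List.range (2 ^ arr.length)).map (innerBitSum arr) := by
  induction arr using List.reverseRecOn with
  | nil => simp [exhaustive_sum_list_alt, innerBitSum]
  | append_singleton ys x ih =>
    unfold exhaustive_sum_list_alt at ih ⊢
    rw [List.foldl_append, List.foldl_cons, List.foldl_nil, ih]
    have hlen : (ys ++ [x]).length = ys.length + 1 := by simp
    rw [hlen, pow_succ, mul_two, List.range_add, List.map_append, List.map_map, List.map_map]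
    congr 1
    · apply List.map_congr_left
      intro n hn
      exact (innerBitSum_low (List.mem_range.mp hn)).symm
    · apply List.map_congr_left
      intro n hn
      have := innerBitSum_high (ys := ys) (x := x) (n := n) (List.mem_range.mp hn)
      simp [Function.comp, this]

-- ===== VERDICT (by name: the statement is the Claim_ definition above) =====
theorem exhaustive_sum_list_spec : Claim_equal_exhaustive_sum_list := by
  intro arr _
  unfold Spec_exhaustive_sum_list
  rw [exhaustive_eq_map, alt_eq_map]
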